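-- pv_equiv track=rewrite | github.com/NikitaCartes/Code-Battle-Tetris | CodeBattlePython/tetris_client/__main__.py | count_full_lines
-- ===== SOURCE A (Python) =====
-- def count_full_lines(current_board: list) -> int:
--     full_lines = 0
--     for y in range(17, -1, -1):
--         is_row_empty = True
--         is_row_has_empty = False
--         for x in range(0, 18):
--             if (x, y) in current_board:
--                 is_row_empty = False
--             else:
--                 is_row_has_empty = True
--                 break
--         if not is_row_has_empty:
--             full_lines += 1
--         if is_row_empty:
--             break
--     return full_lines
-- ===== SOURCE B (Python) =====
-- def count_full_lines(current_board: list) -> int: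
--     # Index the board once: row y -> set of occupied columns.
--     rows = {}
--     for x, y in current_board:
--         rows.setdefault(y, set()).add(x)
--     # Collect the contiguous run of occupied rows starting at y = 17:
--     # a completely empty row ends the reachable stack.
--     stack = []
--     for y in range(17, -1, -1):
--         cells = rows.get(y)
--         if not cells:
--             break
--         stack.append(cells)
--     full_row = set(range(18))
--     return sum(full_row <= cells for cells in stack)
-- ===== Notes on version B (the rewrite author's own statement) =====
-- stated objective: alternative
-- what changed: B indexes the board once into a dict row->set of occupied columns, collects the contiguous stack of non-empty rows from y=17, and counts full rows in that stack by subset tests, replacing A's nested per-cell membership scans with two boolean flags; B also fixes A's early-exit test.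
-- intended difference: On boards that have a completely full row preceded in the scan (larger y, up to 17) only by non-empty rows of which at least one lacks column 0, A stops at the first row missing column 0 and returns the smaller count, while B counts those full rows; B is intended because A's break flag is literally named is_row_empty but fires whenever cell (0,y) alone is missing. — e.g. on count_full_lines([(1,17),(0,16),(1,16),(2,16),(3,16),(4,16),(5,16),(6,16),(7,16),(8,16),(9,16), (10,16),(11,16),(12,16),(13,16),(14,16),…): A returns 0, B returns 1
import Mathlib
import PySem

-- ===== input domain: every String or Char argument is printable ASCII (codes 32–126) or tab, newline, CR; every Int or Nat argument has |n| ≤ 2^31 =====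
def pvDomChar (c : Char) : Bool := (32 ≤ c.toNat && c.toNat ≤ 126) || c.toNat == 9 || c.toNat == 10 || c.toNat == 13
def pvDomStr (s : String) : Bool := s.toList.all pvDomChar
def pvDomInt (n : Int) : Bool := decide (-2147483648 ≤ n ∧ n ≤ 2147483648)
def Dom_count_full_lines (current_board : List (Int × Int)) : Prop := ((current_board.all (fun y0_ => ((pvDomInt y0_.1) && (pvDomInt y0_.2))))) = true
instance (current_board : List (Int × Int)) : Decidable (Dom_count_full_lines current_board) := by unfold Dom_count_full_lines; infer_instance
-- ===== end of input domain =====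

-- B indexes the board once (row -> occupied columns), collects the contiguous stack of
-- non-empty rows from y=17 and counts full rows in it; it also fixes A's early-exit test,
-- which breaks as soon as cell (0,y) is missing although its flag is named is_row_empty.

-- ===== PORT A =====
-- the inner 'for x in range(0, 18)' loop: state (is_row_empty, is_row_has_empty);
-- a missing cell sets is_row_has_empty and breaks
def pvInnerA (b : List (Int × Int)) (y : Int) : List Int → Bool → (Bool × Bool)
  | [], e => (e, false)
  | x :: xs, e =>
    if List.contains b (x, y) then pvInnerA b y xs false
    else (e, true)

-- the outer 'for y in range(17, -1, -1)' loop; returning acc models 'break'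
def pvOuterA (b : List (Int × Int)) : List Int → Int → Int
  | [], acc => acc
  | y :: ys, acc =>
    let r := pvInnerA b y (PySem.List.pyRange 0 18 1) true
    let acc' := if r.2 = false then acc + 1 else acc
    if r.1 then acc' else pvOuterA b ys acc'

def count_full_lines (current_board : List (Int × Int)) : Int :=
  pvOuterA current_board (PySem.List.pyRange 17 (-1) (-1)) 0

-- ===== PORT B =====
-- rows: dict y -> set of occupied columns, built in one pass (setdefault(y, set()).add(x))
def pvRowsB (b : List (Int × Int)) : PySem.Dict Int (PySem.Set Int) :=
  b.foldl (fun d p => d.modify p.2 PySem.Set.empty (fun s => PySem.Set.add s p.1)) PySem.Dict.empty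

-- the collecting loop: 'cells = rows.get(y); if not cells: break; stack.append(cells)'
def pvStackB (rows : PySem.Dict Int (PySem.Set Int)) : List Int → List (PySem.Set Int)
  | [] => []
  | y :: ys =>
    match rows.get? y with
    | none => []
    | some cells => if cells.isEmpty then [] else cells :: pvStackB rows ys

def pvRequired : PySem.Set Int := PySem.Set.ofList (PySem.List.pyRange 0 18 1)

def count_full_lines_alt (current_board : List (Int × Int)) : Int :=
  (pvStackB (pvRowsB current_board) (PySem.List.pyRange 17 (-1) (-1))).foldl
    (fun acc cells => acc + (if PySem.Set.issubset pvRequired cells then 1 else 0)) 0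

-- ===== PRECONDITION & SPEC =====
-- On boards with a full row preceded in the scan (larger y ≤ 17) only by non-empty rows of
-- which at least one lacks column 0, A stops at that missing-column-0 row and undercounts,
-- while B counts those full rows: A's break flag is named is_row_empty but fires whenever
-- cell (0,y) alone is missing, so B's value is the intended one.
def D_count_full_lines (current_board : List (Int × Int)) : Prop :=
  ∃ j ∈ List.range 18, (0, ↑j) ∉ current_board ∧ ∃ k ∈ List.range j,
    ∀ x ∈ List.range 18, (↑x, ↑k) ∈ current_board ∧ (k < x → ↑x ∈ current_board.unzip.2)
instance (current_board : List (Int × Int)) : Decidable (D_count_full_lines current_board) := by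
  unfold D_count_full_lines; infer_instance

def Spec_count_full_lines (current_board : List (Int × Int)) (out : Int) : Prop :=
  ¬ D_count_full_lines current_board → out = count_full_lines_alt current_board
instance (current_board : List (Int × Int)) (out : Int) : Decidable (Spec_count_full_lines current_board out) := by
  unfold Spec_count_full_lines; infer_instance

def pvDiffWitness_count_full_lines : List (Int × Int) :=
  [(1,17),(0,16),(1,16),(2,16),(3,16),(4,16),(5,16),(6,16),(7,16),(8,16),(9,16),
   (10,16),(11,16),(12,16),(13,16),(14,16),(15,16),(16,16),(17,16)]
def pvDiffWitnessOut_count_full_lines : Int × Int := (0, 1)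

-- ===== CLAIM (what is proved, stated in full; the proofs are below) =====
def Claim_unchanged_count_full_lines : Prop := ∀ (current_board : List (Int × Int)), Dom_count_full_lines current_board → Spec_count_full_lines current_board (count_full_lines current_board)
def Claim_changed_count_full_lines : Prop := Dom_count_full_lines (pvDiffWitness_count_full_lines) ∧ D_count_full_lines (pvDiffWitness_count_full_lines) ∧ count_full_lines (pvDiffWitness_count_full_lines) = pvDiffWitnessOut_count_full_lines.1 ∧ count_full_lines_alt (pvDiffWitness_count_full_lines) = pvDiffWitnessOut_count_full_lines.2 ∧ pvDiffWitnessOut_count_full_lines.1 ≠ pvDiffWitnessOut_count_full_lines.2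
def Claim_exact_count_full_lines : Prop := ∀ (current_board : List (Int × Int)), Dom_count_full_lines current_board → D_count_full_lines current_board → count_full_lines current_board ≠ count_full_lines_alt current_board

-- ===== LEMMAS AND PROOFS =====

-- row predicates used by the characterisations
def fullb (b : List (Int × Int)) (y : Int) : Bool :=
  (PySem.List.pyRange 0 18 1).all (fun x => List.contains b (x, y))
def colOKb (b : List (Int × Int)) (y : Int) : Bool := List.contains b (0, y)
def occb (b : List (Int × Int)) (y : Int) : Bool := b.any (fun p => p.2 == y)

-- the common shape of both scans: count full rows while `keep` holds
def pvRun (b : List (Int × Int)) (keep : Int → Bool) : List Int → Int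
  | [] => 0
  | y :: ys => if keep y then (if fullb b y then 1 else 0) + pvRun b keep ys else 0

-- the descending row list 17,16,…,0 as a recursion-friendly family
def descL : Nat → List Int
  | 0 => []
  | n + 1 => (n : Int) :: descL n

theorem descL_18 : PySem.List.pyRange 17 (-1) (-1) = descL 18 := by decide

theorem colOK_mem_iff (b : List (Int × Int)) (y : Int) :
    colOKb b y = true ↔ ((0 : Int), y) ∈ b := by
  unfold colOKb; exact List.contains_iff_mem

theorem occ_of_mem (b : List (Int × Int)) (x y : Int) (hm : (x, y) ∈ b) :
    occb b y = true := by
  unfold occb; rw [List.any_eq_true]; exact ⟨(x, y), hm, by simp⟩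

theorem occ_false (b : List (Int × Int)) (y : Int) (h : ∀ x, (x, y) ∉ b) :
    occb b y = false := by
  unfold occb
  rw [List.any_eq_false]
  rintro ⟨px, py⟩ hp
  simp only [beq_iff_eq]
  intro he; subst he; exact h px hp

theorem full_imp_colOK (b : List (Int × Int)) (y : Int) (h : fullb b y = true) :
    colOKb b y = true := by
  have h0 : (0 : Int) ∈ PySem.List.pyRange 0 18 1 := by decide
  exact List.all_eq_true.mp h 0 h0

theorem full_imp_occ (b : List (Int × Int)) (y : Int) (h : fullb b y = true) :
    occb b y = true := by
  exact occ_of_mem b 0 y ((colOK_mem_iff b y).mp (full_imp_colOK b y h))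

theorem pvRun_nonneg (b : List (Int × Int)) (keep : Int → Bool) (ys : List Int) :
    0 ≤ pvRun b keep ys := by
  induction ys with
  | nil => simp [pvRun]
  | cons y ys ih => simp only [pvRun]; split_ifs <;> omega

-- A's inner loop: second component = some column in xs is missing
theorem pvInnerA_snd (b : List (Int × Int)) (y : Int) (xs : List Int) (e : Bool) :
    (pvInnerA b y xs e).2 = !xs.all (fun x => List.contains b (x, y)) := by
  induction xs generalizing e with
  | nil => simp [pvInnerA]
  | cons x xs ih =>
    by_cases h : (x, y) ∈ b <;> simp [pvInnerA, h, ih]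

-- A's inner loop with is_row_empty already false stays false
theorem pvInnerA_fst_false (b : List (Int × Int)) (y : Int) (xs : List Int) :
    (pvInnerA b y xs false).1 = false := by
  induction xs with
  | nil => simp [pvInnerA]
  | cons x xs ih =>
    by_cases h : (x, y) ∈ b <;> simp [pvInnerA, h, ih]

-- A's inner loop over 0..17: is_row_empty ends up true iff column 0 is missing
theorem pvInnerA_fst (b : List (Int × Int)) (y : Int) :
    (pvInnerA b y (PySem.List.pyRange 0 18 1) true).1 = !colOKb b y := by
  have h : PySem.List.pyRange 0 18 1 = 0 :: PySem.List.pyRange 1 18 1 := by decide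
  rw [h]
  by_cases hc : (0, y) ∈ b <;> simp [pvInnerA, colOKb, hc, pvInnerA_fst_false]

-- A's scan is the keep-while-column-0 run
theorem pvOuterA_run (b : List (Int × Int)) (ys : List Int) (acc : Int) :
    pvOuterA b ys acc = acc + pvRun b (colOKb b) ys := by
  induction ys generalizing acc with
  | nil => simp [pvOuterA, pvRun]
  | cons y ys ih =>
    show (if (pvInnerA b y (PySem.List.pyRange 0 18 1) true).1 = true then _ else _) = _
    rw [pvInnerA_fst]
    have hsnd : (pvInnerA b y (PySem.List.pyRange 0 18 1) true).2 = !fullb b y :=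
      pvInnerA_snd b y _ true
    rw [hsnd]
    cases hk : colOKb b y with
    | true =>
      simp only [Bool.not_true, Bool.false_eq_true, if_false, ih]
      cases hf : fullb b y
      · simp [pvRun, hk, hf]
      · simp [pvRun, hk, hf]
        omega
    | false =>
      have hf : fullb b y = false := by
        cases hf : fullb b y with
        | true => rw [full_imp_colOK b y hf] at hk; cases hk
        | false => rfl
      simp [pvRun, hk, hf]

-- membership in the built row index is membership of the cell in the board
theorem pvMem_rowsB_aux (l : List (Int × Int)) (d : PySem.Dict Int (PySem.Set Int)) (x y : Int) :
    (x ∈ (l.foldl (fun d p => d.modify p.2 PySem.Set.empty (fun s => PySem.Set.add s p.1)) d).getD y PySem.Set.empty)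
      ↔ x ∈ d.getD y PySem.Set.empty ∨ (x, y) ∈ l := by
  induction l generalizing d with
  | nil => simp
  | cons p l ih =>
    simp only [List.foldl_cons, ih, List.mem_cons]
    rw [PySem.Dict.getD_modify]
    by_cases h : y = p.2
    · subst h
      simp [PySem.Set.mem_add, Prod.ext_iff]
      tauto
    · have h' : p.2 ≠ y := fun e => h e.symm
      simp only [if_neg h, Prod.ext_iff]
      tauto

theorem pvMem_rowsB (b : List (Int × Int)) (x y : Int) :
    x ∈ (pvRowsB b).getD y PySem.Set.empty ↔ (x, y) ∈ b := by
  unfold pvRowsB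
  rw [pvMem_rowsB_aux]
  simp [PySem.Dict.empty, PySem.Dict.getD, PySem.Dict.get?, PySem.Set.empty]

-- the subset test of B agrees with the all-columns-present test of A
theorem pvSubset_iff (b : List (Int × Int)) (y : Int) :
    PySem.Set.issubset pvRequired ((pvRowsB b).getD y PySem.Set.empty) = fullb b y := by
  by_cases h : fullb b y = true
  · rw [h, PySem.Set.issubset_iff]
    intro x hx
    rw [pvMem_rowsB]
    have hx' : x ∈ PySem.List.pyRange 0 18 1 := by
      simpa [pvRequired, PySem.Set.mem_ofList] using hx
    simpa using List.all_eq_true.mp h x hx'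
  · simp only [Bool.not_eq_true] at h
    rw [h, Bool.eq_false_iff]
    intro hsub
    rw [PySem.Set.issubset_iff] at hsub
    rw [fullb, List.all_eq_false] at h
    obtain ⟨x, hx, hmiss⟩ := h
    have : x ∈ (pvRowsB b).getD y PySem.Set.empty := by
      apply hsub
      simp [pvRequired, PySem.Set.mem_ofList, hx]
    rw [pvMem_rowsB] at this
    simp [this] at hmiss

-- occupancy read off the row index
theorem pvOcc_of_get?_none (b : List (Int × Int)) (y : Int)
    (h : (pvRowsB b).get? y = none) : occb b y = false := by
  apply occ_false
  intro x hx
  have := (pvMem_rowsB b x y).mpr hx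
  rw [PySem.Dict.getD, h] at this
  simp [PySem.Set.empty] at this

theorem pvOcc_of_get?_nil (b : List (Int × Int)) (y : Int)
    (h : (pvRowsB b).get? y = some []) : occb b y = false := by
  apply occ_false
  intro x hx
  have := (pvMem_rowsB b x y).mpr hx
  rw [PySem.Dict.getD, h] at this
  simp at this

theorem pvOcc_of_get?_cons (b : List (Int × Int)) (y x : Int) (xs : List Int)
    (h : (pvRowsB b).get? y = some (x :: xs)) : occb b y = true := by
  apply occ_of_mem b x y
  rw [← pvMem_rowsB b x y, PySem.Dict.getD, h]
  simp

-- shift the accumulator out of B's summing foldl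
theorem pvSum_shift (l : List (PySem.Set Int)) (acc : Int) :
    l.foldl (fun acc cells => acc + (if PySem.Set.issubset pvRequired cells then 1 else 0)) acc
      = acc + l.foldl (fun acc cells => acc + (if PySem.Set.issubset pvRequired cells then 1 else 0)) 0 := by
  induction l generalizing acc with
  | nil => simp
  | cons c l ih => rw [List.foldl_cons, List.foldl_cons, ih, ih (0 + _)]; omega

-- B's stack-and-sum is the keep-while-occupied run
theorem pvStackB_run (b : List (Int × Int)) (ys : List Int) :
    (pvStackB (pvRowsB b) ys).foldl
      (fun acc cells => acc + (if PySem.Set.issubset pvRequired cells then 1 else 0)) 0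
      = pvRun b (occb b) ys := by
  induction ys with
  | nil => simp [pvStackB, pvRun]
  | cons y ys ih =>
    simp only [pvStackB, pvRun]
    cases h : (pvRowsB b).get? y with
    | none =>
      rw [pvOcc_of_get?_none b y h]
      simp
    | some s =>
      cases s with
      | nil =>
        rw [pvOcc_of_get?_nil b y h]
        simp
      | cons x xs =>
        rw [pvOcc_of_get?_cons b y x xs h]
        have hgd : (pvRowsB b).getD y PySem.Set.empty = x :: xs := by
          rw [PySem.Dict.getD, h]; rfl
        have hs : PySem.Set.issubset pvRequired (x :: xs) = fullb b y := by
          rw [← hgd]; exact pvSubset_iff b y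
        simp only [List.isEmpty_cons, Bool.false_eq_true, if_false, List.foldl_cons]
        rw [pvSum_shift, ih, hs]
        split_ifs <;> omega

-- pointwise: keep-by-column-0 implies keep-by-occupied, so A's run never exceeds B's
-- positivity of the occupied run: a full row under an unbroken occupied stretch
theorem pvRun_occ_pos (b : List (Int × Int)) (n : Nat) :
    pvRun b (occb b) (descL n) ≠ 0
      ↔ ∃ k : Nat, k < n ∧ fullb b (k : Int) = true ∧ (∀ j : Nat, k < j → j < n → occb b (j : Int) = true) := by
  induction n with
  | zero => simp [descL, pvRun]
  | succ n ih =>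
    simp only [descL, pvRun]
    cases hocc : occb b (n : Int) with
    | false =>
      simp only [Bool.false_eq_true, reduceIte]
      constructor
      · intro h; exact absurd rfl h
      · rintro ⟨k, hk, hfull, hup⟩
        by_cases hkn : k = n
        · subst hkn
          exact absurd (full_imp_occ b _ hfull) (by simp [hocc])
        · have := hup n (by omega) (by omega)
          simp [hocc] at this
    | true =>
      simp only [reduceIte]
      have hnn := pvRun_nonneg b (occb b) (descL n)
      constructor
      · intro h
        cases hf : fullb b (n : Int) with
        | true =>
          exact ⟨n, by omega, hf, fun j h1 h2 => absurd h1 (by omega)⟩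
        | false =>
          rw [hf] at h; simp at h
          obtain ⟨k, hk, hfull, hup⟩ := ih.mp h
          refine ⟨k, by omega, hfull, fun j h1 h2 => ?_⟩
          by_cases hj : j = n
          · subst hj; exact hocc
          · exact hup j h1 (by omega)
      · rintro ⟨k, hk, hfull, hup⟩
        by_cases hkn : k = n
        · subst hkn
          rw [hfull]
          simp only [reduceIte]
          omega
        · have hrec : pvRun b (occb b) (descL n) ≠ 0 :=
            ih.mpr ⟨k, by omega, hfull, fun j h1 h2 => hup j h1 (by omega)⟩
          split_ifs <;> omega

-- the two runs differ exactly on the D-shaped boards (truncated to depth n)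
theorem pvRun_diff_char (b : List (Int × Int)) (n : Nat) :
    pvRun b (colOKb b) (descL n) ≠ pvRun b (occb b) (descL n)
      ↔ ∃ k : Nat, k < n ∧ fullb b (k : Int) = true ∧ (∀ j : Nat, k < j → j < n → occb b (j : Int) = true)
          ∧ (∃ j : Nat, k < j ∧ j < n ∧ colOKb b (j : Int) = false) := by
  induction n with
  | zero => simp [descL, pvRun]
  | succ n ih =>
    simp only [descL, pvRun]
    cases hocc : occb b (n : Int) with
    | false =>
      have hcol : colOKb b (n : Int) = false := by
        cases hc : colOKb b (n : Int) with
        | false => rfl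
        | true =>
          have := occ_of_mem b 0 (n : Int) ((colOK_mem_iff b (n : Int)).mp hc)
          simp [this] at hocc
      simp only [hcol, Bool.false_eq_true, reduceIte]
      constructor
      · intro h; exact absurd rfl h
      · rintro ⟨k, hk, hfull, hup, j, hj1, hj2, hj3⟩
        by_cases hkn : k = n
        · omega
        · have := hup n (by omega) (by omega)
          simp [hocc] at this
    | true =>
      cases hcol : colOKb b (n : Int) with
      | true =>
        simp only [reduceIte]
        constructor
        · intro h
          have hne : pvRun b (colOKb b) (descL n) ≠ pvRun b (occb b) (descL n) := by
            intro he; exact h (by rw [he])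
          obtain ⟨k, hk, hfull, hup, j, hj1, hj2, hj3⟩ := ih.mp hne
          refine ⟨k, by omega, hfull, fun j' h1 h2 => ?_, j, hj1, by omega, hj3⟩
          by_cases hj' : j' = n
          · subst hj'; exact hocc
          · exact hup j' h1 (by omega)
        · rintro ⟨k, hk, hfull, hup, j, hj1, hj2, hj3⟩
          have hjn : j ≠ n := by
            intro he; subst he; rw [hcol] at hj3; cases hj3
          have hkn : k ≠ n := by omega
          have hne := ih.mpr ⟨k, by omega, hfull,
            fun j' h1 h2 => hup j' h1 (by omega), j, hj1, by omega, hj3⟩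
          intro he
          exact hne (by omega)
      | false =>
        have hfn : fullb b (n : Int) = false := by
          cases hf : fullb b (n : Int) with
          | false => rfl
          | true => rw [full_imp_colOK b _ hf] at hcol; cases hcol
        simp only [hfn, Bool.false_eq_true, reduceIte, zero_add]
        rw [ne_comm, pvRun_occ_pos]
        constructor
        · rintro ⟨k, hk, hfull, hup⟩
          refine ⟨k, by omega, hfull, fun j h1 h2 => ?_, n, ?_, by omega, hcol⟩
          · by_cases hj : j = n
            · subst hj; exact hocc
            · exact hup j h1 (by omega)
          · by_cases hkn : k = n
            · subst hkn; rw [hfn] at hfull; cases hfull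
            · omega
        · rintro ⟨k, hk, hfull, hup, j, hj1, hj2, hj3⟩
          have hkn : k ≠ n := by
            intro he; subst he; rw [hfn] at hfull; cases hfull
          exact ⟨k, by omega, hfull, fun j' h1 h2 => hup j' h1 (by omega)⟩

-- bridges between the closed-form D_ and the boolean row predicates
theorem fullb_iff (b : List (Int × Int)) (k : Nat) :
    fullb b (k : Int) = true ↔ ∀ x ∈ List.range 18, ((x : Int), (k : Int)) ∈ b := by
  unfold fullb
  rw [show ((18 : Int)) = ((18 : Nat) : Int) by norm_num, PySem.List.pyRange_zero_nat]
  simp [List.all_map, List.all_eq_true]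

theorem colOKb_iff (b : List (Int × Int)) (j : Nat) :
    colOKb b (j : Int) = false ↔ ((0 : Int), (j : Int)) ∉ b := by
  simp [colOKb]

-- occupancy of a row read off the second components
theorem occ_unzip (b : List (Int × Int)) (y : Int) :
    y ∈ b.unzip.2 ↔ occb b y = true := by
  simp [occb, List.any_eq_true, List.unzip_snd]

-- the closed-form D_ is the diff characterisation at depth 18
theorem pvD_iff (b : List (Int × Int)) :
    D_count_full_lines b
      ↔ ∃ k : Nat, k < 18 ∧ fullb b (k : Int) = true ∧ (∀ j : Nat, k < j → j < 18 → occb b (j : Int) = true)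
          ∧ (∃ j : Nat, k < j ∧ j < 18 ∧ colOKb b (j : Int) = false) := by
  unfold D_count_full_lines
  constructor
  · rintro ⟨j, hj, hmem, k, hk, hall⟩
    rw [List.mem_range] at hj hk
    refine ⟨k, by omega, (fullb_iff b k).mpr (fun x hx => (hall x hx).1), ?_,
      j, hk, hj, (colOKb_iff b j).mpr hmem⟩
    intro j' h1 h2
    exact (occ_unzip b _).mp ((hall j' (List.mem_range.mpr h2)).2 h1)
  · rintro ⟨k, hk, hfull, hocc, j, hkj, hj, hcol⟩
    refine ⟨j, List.mem_range.mpr hj, (colOKb_iff b j).mp hcol, k, List.mem_range.mpr hkj,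
      fun x hx => ⟨(fullb_iff b k).mp hfull x hx, fun hkx => ?_⟩⟩
    exact (occ_unzip b _).mpr (hocc x hkx (List.mem_range.mp hx))

-- ===== VERDICT (by name: the statement is the Claim_ definition above) =====
theorem count_full_lines_spec : Claim_unchanged_count_full_lines := by
  intro b _ hD
  unfold count_full_lines count_full_lines_alt
  rw [descL_18, pvOuterA_run, pvStackB_run, zero_add]
  by_contra hne
  exact hD ((pvD_iff b).mpr ((pvRun_diff_char b 18).mp hne))

theorem count_full_lines_changed : Claim_changed_count_full_lines := by
  unfold Claim_changed_count_full_lines; decide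

theorem count_full_lines_tight : Claim_exact_count_full_lines := by
  intro b _ hD
  unfold count_full_lines count_full_lines_alt
  rw [descL_18, pvOuterA_run, pvStackB_run, zero_add]
  exact (pvRun_diff_char b 18).mpr ((pvD_iff b).mp hD)
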